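-- pv_equiv track=rewrite | github.com/Gavino1730/Valiant-Picks | stats-ai-analyzer/ai_analyzer.py | _extract_bets
-- ===== SOURCE A (Python) =====
-- from typing import Dict, Any, List
--
-- def _extract_bets(betting_text: str) -> List[Dict[str, Any]]:
--     """Extract individual bet recommendations."""
--     bets = []
--
--     # Look for common bet types
--     bet_types = ['moneyline', 'spread', 'over/under', 'prop']
--
--     lines = betting_text.split('\n')
--     current_bet = None
--
--     for line in lines:
--         line_lower = line.lower()
--
--         # Check if line mentions a bet type
--         bet_found = False
--         for bet_type in bet_types:
--             if bet_type in line_lower: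
--                 if current_bet:
--                     bets.append(current_bet)
--
--                 current_bet = {
--                     "type": bet_type,
--                     "recommendation": line.strip(),
--                     "confidence": "Medium"  # Default
--                 }
--
--                 # Check for confidence level
--                 if 'high' in line_lower:
--                     current_bet['confidence'] = "High"
--                 elif 'low' in line_lower:
--                     current_bet['confidence'] = "Low"
--
--                 bet_found = True
--                 break
--
--         # Add details to current bet
--         if not bet_found and current_bet and line.strip():
--             current_bet['recommendation'] += '\n' + line.strip()
--
--     # Add last bet
--     if current_bet:
--         bets.append(current_bet)
--
--     # If no structured bets found, create a general recommendation
--     if not bets: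
--         bets.append({
--             "type": "general",
--             "recommendation": betting_text,
--             "confidence": "Medium"
--         })
--
--     return bets
-- ===== SOURCE B (Python) =====
-- from typing import Dict, Any, List
--
-- def _extract_bets(betting_text: str) -> List[Dict[str, Any]]:
--     """Extract individual bet recommendations (segment-then-map decomposition)."""
--     bet_types = ['moneyline', 'spread', 'over/under', 'prop']
--
--     def match_type(line):
--         low = line.lower()
--         for bt in bet_types:
--             if bt in low:
--                 return bt
--         return None
--
--     lines = betting_text.split('\n')
--
--     # Pass 1: split the lines into segments, each starting at a header line
--     # (a line that mentions a bet type); lines before the first header are dropped.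
--     segments = []
--     for line in lines:
--         if match_type(line) is not None:
--             segments.append([line])
--         elif segments:
--             segments[-1].append(line)
--
--     if not segments:
--         return [{
--             "type": "general",
--             "recommendation": betting_text,
--             "confidence": "Medium",
--         }]
--
--     # Pass 2: turn each segment into one bet dict.
--     bets = []
--     for seg in segments:
--         head = seg[0]
--         low = head.lower()
--         conf = "High" if 'high' in low else ("Low" if 'low' in low else "Medium")
--         parts = [head.strip()] + [l.strip() for l in seg[1:] if l.strip()]
--         bets.append({
--             "type": match_type(head),
--             "recommendation": "\n".join(parts),
--             "confidence": conf,
--         })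
--     return bets
-- ===== Notes on version B (the rewrite author's own statement) =====
-- stated objective: alternative
-- what changed: A interleaves parsing and accumulation in one stateful loop (mutating a current-bet dict and flushing it on each new header); B first groups the lines into header-led segments, then maps each segment to its bet dict, joining the stripped continuation lines in one shot.
import Mathlib
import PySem

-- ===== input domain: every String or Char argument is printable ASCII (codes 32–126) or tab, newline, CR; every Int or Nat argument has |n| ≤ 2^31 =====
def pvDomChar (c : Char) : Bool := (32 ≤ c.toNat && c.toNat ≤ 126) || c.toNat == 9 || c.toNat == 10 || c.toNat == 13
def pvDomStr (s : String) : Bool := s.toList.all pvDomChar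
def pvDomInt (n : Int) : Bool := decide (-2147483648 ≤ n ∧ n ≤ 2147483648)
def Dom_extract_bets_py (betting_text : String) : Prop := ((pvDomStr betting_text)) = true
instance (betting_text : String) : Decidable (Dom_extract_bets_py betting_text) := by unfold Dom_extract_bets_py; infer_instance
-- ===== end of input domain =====

-- B re-implements A by a different decomposition: one pass groups the lines into
-- header-led segments, a second pass maps each segment to its bet dict (same values).

-- ===== PORT A =====
def pvBetTypes : List String := ["moneyline", "spread", "over/under", "prop"]

/-- A's inner `for bet_type in bet_types: … break` loop: returns the updated
`(bets, current_bet, bet_found)`. -/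
def pvInnerA (line low : String) (bets : List (PySem.Dict String String))
    (cur : Option (PySem.Dict String String)) :
    List String → List (PySem.Dict String String) × Option (PySem.Dict String String) × Bool
  | [] => (bets, cur, false)
  | bt :: rest =>
    if PySem.Str.isIn bt low then
      let bets' := match cur with
        | some c => bets ++ [c]
        | none => bets
      let nb : PySem.Dict String String :=
        PySem.Dict.mk [("type", bt), ("recommendation", PySem.Str.strip line), ("confidence", "Medium")]
      let nb :=
        if PySem.Str.isIn "high" low then nb.insert "confidence" "High"
        else if PySem.Str.isIn "low" low then nb.insert "confidence" "Low"
        else nb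
      (bets', some nb, true)
    else pvInnerA line low bets cur rest

/-- A's outer `for line in lines` loop, plus the trailing "add last bet".
(`current_bet` dicts are always nonempty, so Python's truthiness test on them is `some _`.) -/
def pvLoopA : List String → List (PySem.Dict String String) → Option (PySem.Dict String String) →
    List (PySem.Dict String String)
  | [], bets, cur =>
    (match cur with
     | some c => bets ++ [c]
     | none => bets)
  | line :: rest, bets, cur =>
    let low := PySem.Str.lower line
    match pvInnerA line low bets cur pvBetTypes with
    | (bets', cur', found) =>
      if !found then
        match cur' with
        | some c =>
          if PySem.Str.strip line ≠ "" then
            pvLoopA rest bets'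
              (some (c.modify "recommendation" "" (fun r => r ++ "\n" ++ PySem.Str.strip line)))
          else pvLoopA rest bets' (some c)
        | none => pvLoopA rest bets' none
      else pvLoopA rest bets' cur'

def extract_bets_py (betting_text : String) : List (List (String × String)) :=
  let lines := (PySem.Str.split? betting_text "\n").getD []   -- sep "\n" ≠ "", so split? is never none
  let bets := pvLoopA lines [] none
  if bets.isEmpty then
    [[("type", "general"), ("recommendation", betting_text), ("confidence", "Medium")]]
  else bets.map PySem.Dict.items

-- ===== PORT B =====
/-- B's `match_type` helper: first bet type mentioned in the line (inner loop over the types). -/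
def pvFindType (low : String) : List String → Option String
  | [] => none
  | bt :: rest => if PySem.Str.isIn bt low then some bt else pvFindType low rest

def pvMatchType (line : String) : Option String :=
  pvFindType (PySem.Str.lower line) pvBetTypes

/-- B's pass 1: group the lines into header-led segments (`segments[-1].append(line)` on the else branch). -/
def pvSegLoop : List String → List (List String) → List (List String)
  | [], segs => segs
  | line :: rest, segs =>
    if (pvMatchType line).isSome then pvSegLoop rest (segs ++ [[line]])
    else if segs ≠ [] then pvSegLoop rest (segs.dropLast ++ [(segs.getLast?.getD []) ++ [line]])
    else pvSegLoop rest segs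

/-- B's pass 2 body: one segment becomes one bet dict. -/
def pvMkBet (seg : List String) : List (String × String) :=
  match seg with
  | [] => []   -- unreachable: pass 1 only builds nonempty segments
  | head :: tail =>
    let low := PySem.Str.lower head
    let conf :=
      if PySem.Str.isIn "high" low then "High"
      else if PySem.Str.isIn "low" low then "Low"
      else "Medium"
    let parts := PySem.Str.strip head ::
      tail.filterMap (fun l => if PySem.Str.strip l = "" then none else some (PySem.Str.strip l))
    [("type", (pvMatchType head).getD ""), ("recommendation", PySem.Str.join "\n" parts),
     ("confidence", conf)]

def extract_bets_py_alt (betting_text : String) : List (List (String × String)) :=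
  let lines := (PySem.Str.split? betting_text "\n").getD []
  let segs := pvSegLoop lines []
  if segs.isEmpty then
    [[("type", "general"), ("recommendation", betting_text), ("confidence", "Medium")]]
  else segs.map pvMkBet

-- ===== PRECONDITION & SPEC =====
def Spec_extract_bets_py (betting_text : String) (out : List (List (String × String))) : Prop := out = extract_bets_py_alt betting_text
instance (betting_text : String) (out : List (List (String × String))) : Decidable (Spec_extract_bets_py betting_text out) := by unfold Spec_extract_bets_py; infer_instance

-- ===== CLAIM (what is proved, stated in full; the proofs are below) =====
def Claim_equal_extract_bets_py : Prop := ∀ (betting_text : String), Dom_extract_bets_py betting_text → Spec_extract_bets_py betting_text (extract_bets_py betting_text)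

-- ===== LEMMAS AND PROOFS =====

/-- The fresh bet dict A builds on a header line (proof-side name for pvInnerA's hit branch). -/
def pvNewA (line low bt : String) : PySem.Dict String String :=
  let nb : PySem.Dict String String :=
    PySem.Dict.mk [("type", bt), ("recommendation", PySem.Str.strip line), ("confidence", "Medium")]
  if PySem.Str.isIn "high" low then nb.insert "confidence" "High"
  else if PySem.Str.isIn "low" low then nb.insert "confidence" "Low"
  else nb

theorem pvInnerA_none (line low : String) (bets : List (PySem.Dict String String))
    (cur : Option (PySem.Dict String String)) (bts : List String)
    (h : pvFindType low bts = none) :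
    pvInnerA line low bets cur bts = (bets, cur, false) := by
  induction bts with
  | nil => rfl
  | cons bt rest ih =>
    simp only [pvFindType] at h
    by_cases hb : PySem.Chars.isIn bt.toList low.toList = true
    · simp [hb] at h
    · simp only [PySem.Str.isIn_eq, hb, Bool.false_eq_true, if_false] at h
      simp only [pvInnerA, PySem.Str.isIn_eq, hb, Bool.false_eq_true, if_false]
      exact ih h

theorem pvInnerA_some (line low : String) (bets : List (PySem.Dict String String))
    (cur : Option (PySem.Dict String String)) (bts : List String) (bt : String)
    (h : pvFindType low bts = some bt) :
    pvInnerA line low bets cur bts =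
      ((match cur with | some c => bets ++ [c] | none => bets), some (pvNewA line low bt), true) := by
  induction bts with
  | nil => simp [pvFindType] at h
  | cons b rest ih =>
    simp only [pvFindType] at h
    by_cases hb : PySem.Chars.isIn b.toList low.toList = true
    · simp only [PySem.Str.isIn_eq, hb, if_true, Option.some.injEq] at h
      subst h
      simp [pvInnerA, hb, pvNewA]
    · simp only [PySem.Str.isIn_eq, hb, Bool.false_eq_true, if_false] at h
      simp only [pvInnerA, PySem.Str.isIn_eq, hb, Bool.false_eq_true, if_false]
      exact ih h

theorem pv_insert_conf (t r v : String) :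
    (PySem.Dict.mk [("type", t), ("recommendation", r), ("confidence", "Medium")]).insert
        "confidence" v =
      PySem.Dict.mk [("type", t), ("recommendation", r), ("confidence", v)] := by
  simp [PySem.Dict.insert, PySem.Dict.contains, PySem.Dict.get?]

theorem pv_modify_rec (t r c : String) (f : String → String) :
    (PySem.Dict.mk [("type", t), ("recommendation", r), ("confidence", c)]).modify
        "recommendation" "" f =
      PySem.Dict.mk [("type", t), ("recommendation", f r), ("confidence", c)] := by
  simp [PySem.Dict.modify, PySem.Dict.insert, PySem.Dict.contains, PySem.Dict.get?,
    PySem.Dict.getD]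

theorem pv_join_singleton (sep s : String) : PySem.Str.join sep [s] = s := by
  apply String.toList_inj.mp
  simp [PySem.Str.toList_join, PySem.Chars.join_singleton]

theorem pv_chars_join_append_singleton (sep y : List Char) :
    ∀ (xs : List (List Char)) (x : List Char),
      PySem.Chars.join sep (x :: (xs ++ [y])) = PySem.Chars.join sep (x :: xs) ++ sep ++ y := by
  intro xs
  induction xs with
  | nil => intro x; simp [PySem.Chars.join_cons_cons, PySem.Chars.join_singleton]
  | cons z zs ih =>
    intro x
    rw [List.cons_append, PySem.Chars.join_cons_cons, PySem.Chars.join_cons_cons, ih z]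
    simp [List.append_assoc]

theorem pv_join_append_singleton (sep : String) (xs : List String) (x y : String) :
    PySem.Str.join sep (x :: (xs ++ [y])) = PySem.Str.join sep (x :: xs) ++ sep ++ y := by
  apply String.toList_inj.mp
  simp only [PySem.Str.toList_join, List.map_cons, List.map_append, List.map_cons, List.map_nil,
    String.toList_append]
  exact pv_chars_join_append_singleton sep.toList y.toList (xs.map String.toList) x.toList

/-- On a header line, A's fresh dict is B's one-line segment dict. -/
theorem pvNewA_eq_mkBet (line bt : String) (h : pvMatchType line = some bt) :
    pvNewA line (PySem.Str.lower line) bt = PySem.Dict.mk (pvMkBet [line]) := by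
  simp only [pvNewA, pvMkBet, h, Option.getD_some, List.filterMap_nil, pv_join_singleton]
  by_cases h1 : PySem.Chars.isIn ['h', 'i', 'g', 'h'] (PySem.Chars.lower line.toList) = true
  · simp [h1, pv_insert_conf]
  · by_cases h2 : PySem.Chars.isIn ['l', 'o', 'w'] (PySem.Chars.lower line.toList) = true
    · simp [h1, h2, pv_insert_conf]
    · simp [h1, h2]

/-- Absorbing a non-blank continuation line into the current bet = extending the segment. -/
theorem pv_mkBet_append_ne (head : String) (tail : List String) (l : String)
    (h : PySem.Str.strip l ≠ "") :
    PySem.Dict.mk (pvMkBet ((head :: tail) ++ [l])) =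
      (PySem.Dict.mk (pvMkBet (head :: tail))).modify "recommendation" ""
        (fun r => r ++ "\n" ++ PySem.Str.strip l) := by
  simp only [pvMkBet, List.cons_append, List.filterMap_append, List.filterMap_cons, h,
    if_neg, List.filterMap_nil, pv_modify_rec]
  simp [h, pv_join_append_singleton]

/-- A blank continuation line changes neither the current bet nor the segment's dict. -/
theorem pv_mkBet_append_eq (head : String) (tail : List String) (l : String)
    (h : PySem.Str.strip l = "") :
    pvMkBet ((head :: tail) ++ [l]) = pvMkBet (head :: tail) := by
  simp [pvMkBet, List.filterMap_append, List.filterMap_cons, h]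

theorem pvSegLoop_frame (lines : List String) :
    ∀ (s0 segs : List (List String)), segs ≠ [] →
      pvSegLoop lines (s0 ++ segs) = s0 ++ pvSegLoop lines segs := by
  induction lines with
  | nil => intro s0 segs _; simp [pvSegLoop]
  | cons line rest ih =>
    intro s0 segs h
    simp only [pvSegLoop]
    by_cases hm : (pvMatchType line).isSome
    · simp only [hm, if_true, List.append_assoc]
      exact ih s0 (segs ++ [[line]]) (by simp)
    · have hne : s0 ++ segs ≠ [] := by simp [h]
      simp only [hm, Bool.false_eq_true, if_false, hne, ne_eq, not_false_iff, if_true, h]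
      rw [List.dropLast_append_of_ne_nil h, List.getLast?_append_of_ne_nil _ h]
      rw [List.append_assoc]
      exact ih s0 _ (by simp)

/-- Main invariant: with a current bet equal to the dict of the (nonempty) open segment,
A's remaining loop produces exactly B's remaining segments, mapped to dicts. -/
theorem pvLoopA_some (lines : List String) :
    ∀ (bets : List (PySem.Dict String String)) (head : String) (tail : List String),
      pvLoopA lines bets (some (PySem.Dict.mk (pvMkBet (head :: tail)))) =
        bets ++ (pvSegLoop lines [head :: tail]).map (fun s => PySem.Dict.mk (pvMkBet s)) := by
  induction lines with
  | nil => intro bets head tail; simp [pvLoopA, pvSegLoop]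
  | cons line rest ih =>
    intro bets head tail
    simp only [pvLoopA, pvSegLoop]
    by_cases hm : (pvMatchType line).isSome
    · obtain ⟨bt, hbt⟩ := Option.isSome_iff_exists.mp hm
      rw [pvInnerA_some line (PySem.Str.lower line) bets _ pvBetTypes bt hbt]
      simp only [hm, if_true, Bool.not_true, Bool.false_eq_true, if_false]
      rw [pvNewA_eq_mkBet line bt hbt, ih (bets ++ [PySem.Dict.mk (pvMkBet (head :: tail))]) line [],
        pvSegLoop_frame rest [head :: tail] [[line]] (by simp)]
      simp
    · have hn : pvFindType (PySem.Str.lower line) pvBetTypes = none := by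
        rcases hfind : pvFindType (PySem.Str.lower line) pvBetTypes with _ | bt
        · rfl
        · exact absurd (Option.isSome_iff_exists.mpr ⟨bt, hfind⟩) (by simpa [pvMatchType, hfind] using hm)
      rw [pvInnerA_none line (PySem.Str.lower line) bets _ pvBetTypes hn]
      simp only [hm, Bool.false_eq_true, if_false, Bool.not_false, if_true, ne_eq,
        not_false_iff, List.cons_ne_nil, List.dropLast_singleton, List.nil_append,
        List.getLast?_singleton, Option.getD_some]
      by_cases hs : PySem.Str.strip line = ""
      · simp only [hs, ne_eq, not_true, if_false]
        have := pv_mkBet_append_eq head tail line hs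
        rw [show pvMkBet (head :: tail) = pvMkBet ((head :: tail) ++ [line]) from this.symm]
        rw [show (head :: tail) ++ [line] = head :: (tail ++ [line]) by simp]
        exact ih bets head (tail ++ [line])
      · simp only [hs, ne_eq, not_false_iff, if_true]
        rw [← pv_mkBet_append_ne head tail line hs]
        rw [show (head :: tail) ++ [line] = head :: (tail ++ [line]) by simp]
        exact ih bets head (tail ++ [line])

/-- Before the first header: A produces what B's segments map to. -/
theorem pvLoopA_none (lines : List String) :
    pvLoopA lines [] none = (pvSegLoop lines []).map (fun s => PySem.Dict.mk (pvMkBet s)) := by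
  induction lines with
  | nil => simp [pvLoopA, pvSegLoop]
  | cons line rest ih =>
    simp only [pvLoopA, pvSegLoop]
    by_cases hm : (pvMatchType line).isSome
    · obtain ⟨bt, hbt⟩ := Option.isSome_iff_exists.mp hm
      rw [pvInnerA_some line (PySem.Str.lower line) [] none pvBetTypes bt hbt]
      simp only [hm, if_true, Bool.not_true, Bool.false_eq_true, if_false]
      rw [pvNewA_eq_mkBet line bt hbt, pvLoopA_some rest [] line []]
      simp
    · have hn : pvFindType (PySem.Str.lower line) pvBetTypes = none := by
        rcases hfind : pvFindType (PySem.Str.lower line) pvBetTypes with _ | bt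
        · rfl
        · exact absurd (Option.isSome_iff_exists.mpr ⟨bt, hfind⟩) (by simpa [pvMatchType, hfind] using hm)
      rw [pvInnerA_none line (PySem.Str.lower line) [] none pvBetTypes hn]
      simpa [hm] using ih

-- ===== VERDICT (by name: the statement is the Claim_ definition above) =====
theorem extract_bets_py_spec : Claim_equal_extract_bets_py := by
  intro t _
  unfold Spec_extract_bets_py
  simp only [extract_bets_py, extract_bets_py_alt]
  rw [pvLoopA_none]
  rcases h : pvSegLoop ((PySem.Str.split? t "\n").getD []) [] with _ | ⟨s, ss⟩
  · simp
  · simp [List.map_map, Function.comp_def, PySem.Dict.items]
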